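-- pv_equiv track=rewrite | github.com/tychocollins/sec-agentic-rag | app/services/sec_service.py | _extract_10k_html
-- ===== SOURCE A (Python) =====
-- def _extract_10k_html(sgml_content: str) -> str:
--     """
--     Extracts the HTML content of the 10-K document from the SGML dump.
--     """
--     # Simple string search - in production use a regex or iterator for memory efficiency
--     # We look for <TYPE>10-K ... <TEXT> ... </TEXT>
--     # Note: Sometimes it's <TYPE>10-K/A
--
--     import re
--     # Find the start of the 10-K document
--     # <DOCUMENT> -> <TYPE>10-K -> ... <TEXT>
--
--     doc_start_pattern = re.compile(r'<DOCUMENT>')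
--     doc_end_pattern = re.compile(r'</DOCUMENT>')
--
--     type_pattern = re.compile(r'<TYPE>10-K')
--
--     # Split by document seems safer but memory intensive.
--     # Let's simple split by <DOCUMENT>
--     documents = sgml_content.split('<DOCUMENT>')
--
--     for doc in documents:
--         if "<TYPE>10-K" in doc or "<TYPE>10-K/A" in doc:
--             # Extract text between <TEXT> and </TEXT>
--             start = doc.find('<TEXT>')
--             end = doc.find('</TEXT>')
--             if start != -1 and end != -1:
--                 return doc[start+6:end]
--
--     # Fallback: just return the whole thing if we can't find specific 10-K section,
--     # but warn or maybe return first large chunk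
--     return sgml_content
-- ===== SOURCE B (Python) =====
-- def _extract_10k_html(sgml_content: str) -> str:
--     # Occurrence-driven search: instead of splitting the dump into document
--     # segments, jump straight to each '<TYPE>10-K' marker in the whole string
--     # and reconstruct the enclosing '<DOCUMENT>'-delimited segment around it.
--     # Correct because the markers cannot overlap a '<DOCUMENT>' delimiter and
--     # '<DOCUMENT>' cannot overlap itself, so every marker occurrence lies
--     # entirely inside exactly one split segment.
--     DOC = '<DOCUMENT>'
--     pos = sgml_content.find('<TYPE>10-K')
--     while pos != -1:
--         lo = sgml_content.rfind(DOC, 0, pos)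
--         lo = 0 if lo == -1 else lo + len(DOC)
--         hi = sgml_content.find(DOC, pos)
--         if hi == -1:
--             hi = len(sgml_content)
--         seg = sgml_content[lo:hi]
--         start = seg.find('<TEXT>')
--         end = seg.find('</TEXT>')
--         if start != -1 and end != -1:
--             return seg[start + 6:end]
--         pos = sgml_content.find('<TYPE>10-K', hi)
--     return sgml_content
-- ===== Notes on version B (the rewrite author's own statement) =====
-- stated objective: alternative
-- what changed: A splits the whole dump into a list of <DOCUMENT> segments and scans that list for one containing the <TYPE>10-K marker; B never splits: it searches the whole string for each occurrence of the <TYPE>10-K marker directly (str.find), reconstructs the enclosing document segment around the hit with rfind/find of the <DOCUMENT> delimiter, and jumps past that segment on failure - correct because none of the markers can overlap the delimiter, so each marker occurrence lies inside exactly one split segment.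
import Mathlib
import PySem

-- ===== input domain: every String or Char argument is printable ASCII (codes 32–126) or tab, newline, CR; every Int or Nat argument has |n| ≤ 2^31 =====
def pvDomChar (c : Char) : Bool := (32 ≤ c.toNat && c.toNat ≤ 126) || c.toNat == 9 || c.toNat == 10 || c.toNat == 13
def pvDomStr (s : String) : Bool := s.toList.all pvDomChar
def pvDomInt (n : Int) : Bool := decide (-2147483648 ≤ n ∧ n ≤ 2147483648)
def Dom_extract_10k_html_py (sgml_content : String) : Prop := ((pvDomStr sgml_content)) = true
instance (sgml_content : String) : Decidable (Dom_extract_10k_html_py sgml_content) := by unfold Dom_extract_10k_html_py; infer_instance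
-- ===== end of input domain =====

-- B replaces A's split-the-dump-into-a-segment-list-and-scan by a direct search for each
-- '<TYPE>10-K' marker occurrence in the whole string, reconstructing the enclosing
-- '<DOCUMENT>'-delimited segment around the hit with rfind/find; objective: alternative
-- algorithm (no segment list is ever built), same return value.

-- the literal markers both programs search for
def pvDocM : List Char := "<DOCUMENT>".toList
def pvTypeM : List Char := "<TYPE>10-K".toList
def pvTypeAM : List Char := "<TYPE>10-K/A".toList
def pvTextO : List Char := "<TEXT>".toList
def pvTextC : List Char := "</TEXT>".toList

-- ===== PORT A =====
-- A: split the dump on '<DOCUMENT>', scan the segments in order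
def pvLoopA (whole : List Char) : List (List Char) → List Char
  | [] => whole
  | doc :: rest =>
    if PySem.Chars.isIn pvTypeM doc || PySem.Chars.isIn pvTypeAM doc then
      let start := PySem.Chars.find doc pvTextO
      let stop := PySem.Chars.find doc pvTextC
      if start ≠ -1 ∧ stop ≠ -1 then
        PySem.Chars.slice doc (some (start + 6)) (some stop)
      else pvLoopA whole rest
    else pvLoopA whole rest

def extract_10k_html_py (sgml_content : String) : String :=
  String.ofList
    (pvLoopA sgml_content.toList
      (PySem.Chars.splitOn sgml_content.toList pvDocM))

-- ===== PORT B =====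
-- termination facts for port B's marker-occurrence recursion, cited in decreasing_by
theorem pvFindFrom_gt {s sub : List Char} {k : Nat} (h : s.length < k) :
    PySem.Chars.findFrom s sub (k : Int) none = -1 := by
  unfold PySem.Chars.findFrom
  have h1 : ¬ ((k : Int) < 0) := by omega
  have h2 : ((s.length : Int)) < (k : Int) := by omega
  simp only [h1, reduceIte]
  rw [if_pos h2]

theorem pvAlt_bound (cs : List Char) (k : Nat)
    (h : PySem.Chars.findFrom cs pvTypeM (k : Int) none ≠ -1) :
    k < (if PySem.Chars.findFrom cs pvDocM (PySem.Chars.findFrom cs pvTypeM (k : Int) none) none = -1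
          then cs.length
          else (PySem.Chars.findFrom cs pvDocM (PySem.Chars.findFrom cs pvTypeM (k : Int) none) none).toNat) ∧
    (if PySem.Chars.findFrom cs pvDocM (PySem.Chars.findFrom cs pvTypeM (k : Int) none) none = -1
          then cs.length
          else (PySem.Chars.findFrom cs pvDocM (PySem.Chars.findFrom cs pvTypeM (k : Int) none) none).toNat) ≤ cs.length := by
  have hk : k ≤ cs.length := by
    by_contra hk
    exact h (pvFindFrom_gt (by omega))
  obtain ⟨h1, h2, _⟩ := PySem.Chars.findFrom_natCast_spec cs pvTypeM k hk h
  set pos := PySem.Chars.findFrom cs pvTypeM (k : Int) none with hposdef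
  have hlen := h2.length_le
  rw [List.length_drop] at hlen
  have h10 : pvTypeM.length = 10 := by decide
  have hple : pos.toNat ≤ cs.length := by omega
  by_cases hq : PySem.Chars.findFrom cs pvDocM pos none = -1
  · rw [if_pos hq]
    omega
  · rw [if_neg hq]
    have hcast : pos = ((pos.toNat : Nat) : Int) := by omega
    rw [hcast] at hq
    obtain ⟨hq1, hq2, _⟩ := PySem.Chars.findFrom_natCast_spec cs pvDocM pos.toNat hple hq
    have hqlen := hq2.length_le
    rw [List.length_drop] at hqlen
    have hq10 : pvDocM.length = 10 := by decide
    rw [← hcast] at hq1 hq2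
    have hne : (PySem.Chars.findFrom cs pvDocM pos none).toNat ≠ pos.toNat := by
      intro heq
      rw [heq] at hq2
      rcases List.prefix_or_prefix_of_prefix h2 hq2 with hc | hc
      · have := hc.eq_of_length (by decide)
        exact absurd this (by decide)
      · have := hc.eq_of_length (by decide)
        exact absurd this (by decide)
    rw [← hcast] at hqlen
    omega

-- B: search the whole string for the next '<TYPE>10-K' occurrence, rebuild the enclosing
-- '<DOCUMENT>'-delimited segment around it with rfind/find, try its <TEXT> payload,
-- and on failure continue the marker search past that segment
def pvAltGo (cs : List Char) (k : Nat) : List Char :=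
  let pos := PySem.Chars.findFrom cs pvTypeM (k : Int) none
  if hpos : pos = -1 then cs
  else
    let lo0 := PySem.Chars.rfindFrom cs pvDocM 0 (some pos)
    let lo : Int := if lo0 = -1 then 0 else lo0 + 10
    let hiI := PySem.Chars.findFrom cs pvDocM pos none
    let hi : Nat := if hiI = -1 then cs.length else hiI.toNat
    let seg := PySem.Chars.slice cs (some lo) (some (hi : Int))
    let start := PySem.Chars.find seg pvTextO
    let stop := PySem.Chars.find seg pvTextC
    if start ≠ -1 ∧ stop ≠ -1 then
      PySem.Chars.slice seg (some (start + 6)) (some stop)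
    else pvAltGo cs hi
termination_by cs.length - k
decreasing_by
  have := pvAlt_bound cs k hpos
  simp only [dite_eq_ite] at *
  omega

def extract_10k_html_py_alt (sgml_content : String) : String :=
  String.ofList (pvAltGo sgml_content.toList 0)

-- ===== PRECONDITION & SPEC =====
def Spec_extract_10k_html_py (sgml_content : String) (out : String) : Prop := out = extract_10k_html_py_alt sgml_content
instance (sgml_content : String) (out : String) : Decidable (Spec_extract_10k_html_py sgml_content out) := by unfold Spec_extract_10k_html_py; infer_instance

-- ===== CLAIM (what is proved, stated in full; the proofs are below) =====
def Claim_equal_extract_10k_html_py : Prop := ∀ (sgml_content : String), Dom_extract_10k_html_py sgml_content → Spec_extract_10k_html_py sgml_content (extract_10k_html_py sgml_content)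

-- ===== LEMMAS AND PROOFS =====

-- find points at the first occurrence: the converse direction of find_spec
theorem pvFind_eq {s sub : List Char} {k : Nat} (hp : sub <+: s.drop k)
    (hmin : ∀ i < k, ¬ sub <+: s.drop i) : PySem.Chars.find s sub = (k : Int) := by
  have hin : PySem.Chars.isIn sub s = true :=
    (PySem.Chars.exists_prefix_drop_iff_isIn sub s).1 ⟨k, hp⟩
  have h0 : 0 ≤ PySem.Chars.find s sub :=
    (PySem.Chars.find_nonneg_iff s sub).2 ((PySem.Chars.isIn_iff_infix sub s).1 hin)
  obtain ⟨h1, h2⟩ := PySem.Chars.find_spec h0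
  have hk : (PySem.Chars.find s sub).toNat = k := by
    rcases lt_trichotomy (PySem.Chars.find s sub).toNat k with h | h | h
    · exact absurd h1 (hmin _ h)
    · exact h
    · exact absurd hp (h2 _ h)
  omega

theorem pvFind_zero {s sub : List Char} (hp : sub <+: s) : PySem.Chars.find s sub = 0 := by
  have := pvFind_eq (s := s) (sub := sub) (k := 0) (by simpa) (by omega)
  simpa using this

theorem pvFind_cons {c : Char} {rest sub : List Char} (hnp : ¬ sub <+: (c :: rest)) :
    PySem.Chars.find (c :: rest) sub =
      if PySem.Chars.find rest sub = -1 then -1 else PySem.Chars.find rest sub + 1 := by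
  by_cases hr : PySem.Chars.find rest sub = -1
  · simp only [hr, if_pos]
    rw [PySem.Chars.find_eq_neg_one_iff] at hr ⊢
    intro hinf
    have hin := (PySem.Chars.isIn_iff_infix sub (c :: rest)).2 hinf
    obtain ⟨j, hj⟩ := (PySem.Chars.exists_prefix_drop_iff_isIn sub (c :: rest)).2 hin
    cases j with
    | zero => exact hnp (by simpa using hj)
    | succ j =>
      apply hr
      have hj' : sub <+: rest.drop j := by simpa using hj
      exact hj'.isInfix.trans (List.drop_suffix j rest).isInfix
  · have h0 : 0 ≤ PySem.Chars.find rest sub := by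
      have := PySem.Chars.neg_one_le_find rest sub; omega
    obtain ⟨h1, h2⟩ := PySem.Chars.find_spec h0
    have heq : PySem.Chars.find (c :: rest) sub =
        (((PySem.Chars.find rest sub).toNat + 1 : Nat) : Int) := by
      apply pvFind_eq
      · simpa using h1
      · intro i hi
        cases i with
        | zero => simpa using hnp
        | succ i => simpa using h2 i (by omega)
    rw [heq, if_neg hr]
    omega

-- termination fact for port A's split recursion: a found '<DOCUMENT>' occupies
-- 10 characters of cs, so the split cursor advances past at least 10 characters
theorem pvFind_doc_bound {cs : List Char} (h : ¬ PySem.Chars.find cs pvDocM = -1) :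
    (PySem.Chars.find cs pvDocM).toNat + 10 ≤ cs.length := by
  have hge : -1 ≤ PySem.Chars.find cs pvDocM := PySem.Chars.neg_one_le_find cs pvDocM
  have h0 : 0 ≤ PySem.Chars.find cs pvDocM := by omega
  have hle := PySem.Chars.find_le_length cs pvDocM
  have hp := (PySem.Chars.find_spec h0).1
  have hlen := hp.length_le
  rw [List.length_drop] at hlen
  have h10 : pvDocM.length = 10 := by decide
  omega

-- the find-based functional form of split('<DOCUMENT>')
def pvSplitF (cs : List Char) : List (List Char) :=
  if PySem.Chars.find cs pvDocM = -1 then [cs]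
  else
    cs.take (PySem.Chars.find cs pvDocM).toNat ::
      pvSplitF (cs.drop ((PySem.Chars.find cs pvDocM).toNat + 10))
termination_by cs.length
decreasing_by
  rename_i h
  have := pvFind_doc_bound h
  rw [List.length_drop]
  omega

def pvConsHead (x : List Char) : List (List Char) → List (List Char)
  | [] => [x]
  | y :: ys => (x ++ y) :: ys

theorem pvSplitF_ne_nil (cs : List Char) : pvSplitF cs ≠ [] := by
  rw [pvSplitF]; split <;> simp

theorem pvConsHead_nil {L : List (List Char)} (h : L ≠ []) : pvConsHead [] L = L := by
  cases L with
  | nil => exact absurd rfl h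
  | cons y ys => simp [pvConsHead]

theorem pvSplitF_of_neg (cs : List Char) (h : PySem.Chars.find cs pvDocM = -1) :
    pvSplitF cs = [cs] := by
  rw [pvSplitF, if_pos h]

theorem pvSplitF_of_found (cs : List Char) (h : ¬ PySem.Chars.find cs pvDocM = -1) :
    pvSplitF cs =
      cs.take (PySem.Chars.find cs pvDocM).toNat ::
        pvSplitF (cs.drop ((PySem.Chars.find cs pvDocM).toNat + 10)) := by
  rw [pvSplitF, if_neg h]

theorem pvGo_splitF : ∀ (fuel : Nat) (cs cur : List Char) (acc : List (List Char)),
    cs.length < fuel →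
    PySem.Chars.splitOn.go pvDocM fuel cs cur acc =
      acc.reverse ++ pvConsHead cur.reverse (pvSplitF cs) := by
  intro fuel
  induction fuel with
  | zero => intro cs cur acc h; omega
  | succ fuel ih =>
    intro cs cur acc h
    cases cs with
    | nil =>
      rw [pvSplitF]
      simp [PySem.Chars.splitOn.go, pvDocM, PySem.Chars.find_eq_neg_one_iff, pvConsHead]
    | cons c rest =>
      by_cases hpre : pvDocM.isPrefixOf (c :: rest)
      · have hpfx : pvDocM <+: (c :: rest) := by
          rwa [List.isPrefixOf_iff_prefix] at hpre
        have hfind : PySem.Chars.find (c :: rest) pvDocM = 0 := pvFind_zero hpfx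
        have hlen : pvDocM.length = 10 := by decide
        have hstep : PySem.Chars.splitOn.go pvDocM (fuel + 1) (c :: rest) cur acc =
            PySem.Chars.splitOn.go pvDocM fuel ((c :: rest).drop pvDocM.length) []
              (cur.reverse :: acc) := by
          conv_lhs => rw [PySem.Chars.splitOn.go]
          simp [hpre]
        rw [hstep, ih _ _ _ (by rw [List.length_drop, hlen]; simp only [List.length_cons] at h ⊢; omega)]
        conv_rhs => rw [pvSplitF]
        simp only [List.reverse_cons, List.reverse_nil]
        rw [pvConsHead_nil (pvSplitF_ne_nil _)]
        simp [hfind, hlen, pvConsHead]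
      · have hnp : ¬ pvDocM <+: (c :: rest) := by
          rwa [List.isPrefixOf_iff_prefix] at hpre
        have hstep : PySem.Chars.splitOn.go pvDocM (fuel + 1) (c :: rest) cur acc =
            PySem.Chars.splitOn.go pvDocM fuel rest (c :: cur) acc := by
          conv_lhs => rw [PySem.Chars.splitOn.go]
          simp [hpre]
        rw [hstep, ih _ _ _ (by simp only [List.length_cons] at h; omega)]
        have hfc := pvFind_cons (sub := pvDocM) hnp
        by_cases hr : PySem.Chars.find rest pvDocM = -1
        · have hfind : PySem.Chars.find (c :: rest) pvDocM = -1 := by rw [hfc, if_pos hr]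
          rw [pvSplitF_of_neg _ hfind, pvSplitF_of_neg _ hr]
          simp [pvConsHead]
        · have h0 : 0 ≤ PySem.Chars.find rest pvDocM := by
            have := PySem.Chars.neg_one_le_find rest pvDocM; omega
          have hfind : PySem.Chars.find (c :: rest) pvDocM =
              PySem.Chars.find rest pvDocM + 1 := by rw [hfc]; simp [hr]
          have ht : (PySem.Chars.find rest pvDocM + 1).toNat =
              (PySem.Chars.find rest pvDocM).toNat + 1 := by omega
          rw [pvSplitF_of_found rest hr,
            pvSplitF_of_found (c :: rest) (by rw [hfind]; omega),
            hfind, ht]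
          have h11 : (PySem.Chars.find rest pvDocM).toNat + 1 + 10 =
              ((PySem.Chars.find rest pvDocM).toNat + 10) + 1 := by omega
          rw [h11]
          simp [pvConsHead, List.take_succ_cons, List.drop_succ_cons]

theorem pvSplitOn_eq (cs : List Char) :
    PySem.Chars.splitOn cs pvDocM = pvSplitF cs := by
  unfold PySem.Chars.splitOn
  rw [pvGo_splitF (cs.length + 1) cs [] [] (by omega)]
  simp [pvConsHead_nil (pvSplitF_ne_nil cs)]

-- every occurrence of '<TYPE>10-K/A' contains '<TYPE>10-K', so A's disjunction
-- collapses to a single membership test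
theorem pvType_or (seg : List Char) :
    (PySem.Chars.isIn pvTypeM seg || PySem.Chars.isIn pvTypeAM seg) =
      PySem.Chars.isIn pvTypeM seg := by
  cases h : PySem.Chars.isIn pvTypeAM seg with
  | false => simp
  | true =>
    have hinf : pvTypeM <:+: seg := by
      have hp : pvTypeM <+: pvTypeAM := by decide
      exact hp.isInfix.trans ((PySem.Chars.isIn_iff_infix _ _).1 h)
    simp [(PySem.Chars.isIn_iff_infix pvTypeM seg).2 hinf]

-- ===== occurrence toolbox =====
theorem pvPrefix_take_iff {sub l : List Char} {m : Nat} :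
    sub <+: l.take m ↔ sub <+: l ∧ sub.length ≤ m := by
  constructor
  · intro h
    refine ⟨h.trans (List.take_prefix m l), h.length_le.trans ?_⟩
    simp [List.length_take]
  · rintro ⟨h, hm⟩
    have he : sub = (l.take m).take sub.length := by
      rw [List.take_take, min_eq_left hm, ← List.prefix_iff_eq_take.1 h]
    rw [he]
    exact List.take_prefix _ _

theorem pvPrefix_drop_take {sub l : List Char} {i m : Nat} (hsub : sub ≠ []) :
    sub <+: (l.take m).drop i ↔ sub <+: l.drop i ∧ i + sub.length ≤ m := by
  have hlen : 0 < sub.length := List.length_pos_of_ne_nil hsub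
  rw [List.drop_take, pvPrefix_take_iff]
  constructor
  · rintro ⟨h, hm⟩; exact ⟨h, by omega⟩
  · rintro ⟨h, hm⟩; exact ⟨h, by omega⟩

theorem pvPrefix_drop_mono {X u : List Char} {j : Nat} (hX : X <+: u) (hj : j ≤ X.length) :
    X.drop j <+: u.drop j := by
  obtain ⟨t, rfl⟩ := hX
  rw [List.drop_append_of_le_length hj]
  exact List.prefix_append _ _

-- two marker occurrences cannot overlap (the concrete markers share no border)
theorem pvSep {X Y u : List Char} {a b : Nat} (hX : X <+: u.drop a) (hY : Y <+: u.drop b)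
    (hab : a < b) (hbX : b < a + X.length)
    (hdec : ∀ j < X.length, 0 < j → ¬ (X.drop j <+: Y) ∧ ¬ (Y <+: X.drop j)) : False := by
  have hj1 : b - a ≤ X.length := by omega
  have hXd : X.drop (b - a) <+: (u.drop a).drop (b - a) := pvPrefix_drop_mono hX hj1
  rw [List.drop_drop, Nat.add_comm, Nat.sub_add_cancel (by omega)] at hXd
  obtain ⟨hd1, hd2⟩ := hdec (b - a) (by omega) (by omega)
  rcases List.prefix_or_prefix_of_prefix hXd hY with hc | hc
  · exact hd1 hc
  · exact hd2 hc

theorem pvSepDD {u : List Char} {a b : Nat} (hA : pvDocM <+: u.drop a)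
    (hB : pvDocM <+: u.drop b) (h1 : a < b) (h2 : b < a + 10) : False := by
  exact pvSep hA hB h1 (by simpa using h2) (by decide)

theorem pvSepDT {u : List Char} {a b : Nat} (hA : pvDocM <+: u.drop a)
    (hB : pvTypeM <+: u.drop b) (h1 : a ≤ b) (h2 : b < a + 10) : False := by
  rcases Nat.eq_or_lt_of_le h1 with rfl | h1
  · rcases List.prefix_or_prefix_of_prefix hA hB with hc | hc
    · exact absurd (hc.eq_of_length (by decide)) (by decide)
    · exact absurd (hc.eq_of_length (by decide)) (by decide)
  · exact pvSep hA hB h1 (by simpa using h2) (by decide)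

theorem pvSepTD {u : List Char} {a b : Nat} (hA : pvTypeM <+: u.drop a)
    (hB : pvDocM <+: u.drop b) (h1 : a ≤ b) (h2 : b < a + 10) : False := by
  rcases Nat.eq_or_lt_of_le h1 with rfl | h1
  · rcases List.prefix_or_prefix_of_prefix hA hB with hc | hc
    · exact absurd (hc.eq_of_length (by decide)) (by decide)
    · exact absurd (hc.eq_of_length (by decide)) (by decide)
  · exact pvSep hA hB h1 (by simpa using h2) (by decide)

-- ===== rfind characterisation =====
theorem pvRfindGo_eq {s sub : List Char} {j : Nat} (m : Nat) (hjm : j ≤ m)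
    (h1 : sub <+: s.drop j) (h2 : ∀ i, j < i → ¬ sub <+: s.drop i) :
    PySem.Chars.rfind.go s sub m = (j : Int) := by
  induction m with
  | zero =>
    have hj0 : j = 0 := by omega
    subst hj0
    rw [PySem.Chars.rfind.go]
    simp only [List.drop_zero] at h1
    rw [if_pos (List.isPrefixOf_iff_prefix.2 h1)]
    simp
  | succ m ih =>
    rw [PySem.Chars.rfind.go]
    rcases Nat.eq_or_lt_of_le hjm with rfl | hlt
    · rw [if_pos (List.isPrefixOf_iff_prefix.2 h1)]
    · have hnp : ¬ sub.isPrefixOf (s.drop (m + 1)) := by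
        rw [List.isPrefixOf_iff_prefix]
        exact h2 (m + 1) (by omega)
      rw [if_neg hnp]
      exact ih (by omega)

theorem pvRfind_eq {s sub : List Char} {j : Nat} (hj : j ≤ s.length)
    (h1 : sub <+: s.drop j) (h2 : ∀ i, j < i → ¬ sub <+: s.drop i) :
    PySem.Chars.rfind s sub = (j : Int) := by
  exact pvRfindGo_eq s.length hj h1 h2

theorem pvRfind_neg {s sub : List Char} (h : ∀ i, ¬ sub <+: s.drop i) :
    PySem.Chars.rfind s sub = -1 := by
  unfold PySem.Chars.rfind
  generalize s.length = m
  induction m with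
  | zero =>
    rw [PySem.Chars.rfind.go]
    rw [if_neg (by rw [List.isPrefixOf_iff_prefix]; simpa using h 0)]
  | succ m ih =>
    rw [PySem.Chars.rfind.go]
    rw [if_neg (by rw [List.isPrefixOf_iff_prefix]; exact h (m + 1))]
    exact ih

theorem pvRfindFrom_take {s sub : List Char} {e : Nat} (he : e ≤ s.length) :
    PySem.Chars.rfindFrom s sub 0 (some (e : Int)) = PySem.Chars.rfind (s.take e) sub := by
  unfold PySem.Chars.rfindFrom
  have h1 : ¬ ((s.length : Int) < (e : Int)) := by omega
  have h2 : ¬ ((e : Int) < 0) := by omega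
  have h3 : ¬ ((0 : Int) < 0) := by omega
  simp only [h1, h2, h3, reduceIte]
  have h5 : ((e : Int)).toNat = e := by omega
  rw [h5, Int.toNat_zero, List.drop_zero]
  by_cases hr : PySem.Chars.rfind (s.take e) sub = -1
  · rw [if_pos hr, hr]
  · rw [if_neg hr]
    omega

-- ===== findFrom helpers =====
theorem pvFindFrom_append (pre cs sub : List Char) :
    PySem.Chars.findFrom (pre ++ cs) sub ((pre.length : Nat) : Int) none =
      if PySem.Chars.find cs sub = -1 then -1
      else (pre.length : Int) + PySem.Chars.find cs sub := by
  have hk : pre.length ≤ (pre ++ cs).length := by simp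
  rw [PySem.Chars.findFrom_natCast _ _ _ hk, List.drop_left]

theorem pvFindFrom_shift {cs sub : List Char} {k1 k2 : Nat} (hk : k1 ≤ k2)
    (h2 : k2 ≤ cs.length) (hno : ∀ i, k1 ≤ i → i < k2 → ¬ sub <+: cs.drop i) :
    PySem.Chars.findFrom cs sub (k1 : Int) none = PySem.Chars.findFrom cs sub (k2 : Int) none := by
  have h1 : k1 ≤ cs.length := le_trans hk h2
  rw [PySem.Chars.findFrom_natCast _ _ _ h1, PySem.Chars.findFrom_natCast _ _ _ h2]
  by_cases hr : PySem.Chars.find (cs.drop k2) sub = -1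
  · rw [if_pos hr]
    have hr1 : PySem.Chars.find (cs.drop k1) sub = -1 := by
      rw [PySem.Chars.find_eq_neg_one_iff] at hr ⊢
      intro hinf
      obtain ⟨j, hj⟩ := (PySem.Chars.exists_prefix_drop_iff_isIn sub _).2
        ((PySem.Chars.isIn_iff_infix _ _).2 hinf)
      rw [List.drop_drop] at hj
      by_cases hjk : k1 + j < k2
      · exact hno (k1 + j) (by omega) hjk hj
      · apply hr
        have hj2 : sub <+: (cs.drop k2).drop (k1 + j - k2) := by
          rw [List.drop_drop]
          have he : k2 + (k1 + j - k2) = k1 + j := by omega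
          rw [he]; exact hj
        exact hj2.isInfix.trans (List.drop_suffix _ _).isInfix
    rw [if_pos hr1]
  · rw [if_neg hr]
    have h0 : 0 ≤ PySem.Chars.find (cs.drop k2) sub := by
      have := PySem.Chars.neg_one_le_find (cs.drop k2) sub; omega
    obtain ⟨hp, hmin⟩ := PySem.Chars.find_spec h0
    rw [List.drop_drop] at hp
    have hfind1 : PySem.Chars.find (cs.drop k1) sub =
        ((k2 + (PySem.Chars.find (cs.drop k2) sub).toNat - k1 : Nat) : Int) := by
      apply pvFind_eq
      · rw [List.drop_drop]
        have he : k1 + (k2 + (PySem.Chars.find (cs.drop k2) sub).toNat - k1) =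
            k2 + (PySem.Chars.find (cs.drop k2) sub).toNat := by omega
        rw [he]; exact hp
      · intro i hi
        rw [List.drop_drop]
        by_cases hik : k1 + i < k2
        · exact hno (k1 + i) (by omega) hik
        · have hm := hmin (k1 + i - k2) (by omega)
          rw [List.drop_drop] at hm
          have he : k2 + (k1 + i - k2) = k1 + i := by omega
          rw [he] at hm
          exact hm
    have hne1 : PySem.Chars.find (cs.drop k1) sub ≠ -1 := by rw [hfind1]; omega
    rw [if_neg hne1, hfind1]
    omega

theorem pvAltGo_congr {cs : List Char} {k1 k2 : Nat}
    (h : PySem.Chars.findFrom cs pvTypeM (k1 : Int) none = PySem.Chars.findFrom cs pvTypeM (k2 : Int) none) :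
    pvAltGo cs k1 = pvAltGo cs k2 := by
  rw [pvAltGo, pvAltGo, h]

-- A returns the fallback when no segment contains the 10-K marker
theorem pvInfix_of_prefix_drop {sub l : List Char} {i : Nat} (h : sub <+: l.drop i) :
    sub <:+: l :=
  h.isInfix.trans (List.drop_suffix i l).isInfix

theorem pvDrop_append_ge {pre cs : List Char} {i : Nat} (h : pre.length ≤ i) :
    (pre ++ cs).drop i = cs.drop (i - pre.length) := by
  rw [List.drop_append, List.drop_eq_nil_of_le h, List.nil_append]

theorem pvLoopA_none {whole : List Char} (cs : List Char) (h : ¬ pvTypeM <:+: cs) :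
    pvLoopA whole (pvSplitF cs) = whole := by
  revert h
  induction cs using pvSplitF.induct with
  | case1 cs hd =>
    intro h
    rw [pvSplitF_of_neg cs hd, pvLoopA, pvType_or, (PySem.Chars.isIn_eq_false_iff _ _).2 h]
    simp only [Bool.false_eq_true, if_false]
    rw [pvLoopA]
  | case2 cs hd ih =>
    intro h
    rw [pvSplitF_of_found cs hd, pvLoopA, pvType_or]
    have h1 : PySem.Chars.isIn pvTypeM (cs.take (PySem.Chars.find cs pvDocM).toNat) = false := by
      rw [PySem.Chars.isIn_eq_false_iff]
      intro hinf
      exact h (hinf.trans (List.take_prefix _ _).isInfix)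
    rw [h1]
    simp only [Bool.false_eq_true, if_false]
    exact ih (fun hinf => h (hinf.trans (List.drop_suffix _ _).isInfix))

-- value of B's 'lo' cursor: the last '<DOCUMENT>' before the marker is exactly the one
-- that ends the accumulated prefix (or there is none)
theorem pvLo_val {pre cs : List Char} (hpre : pre = [] ∨ ∃ q, pre = q ++ pvDocM)
    {p : Nat} (hplen : pre.length + p ≤ (pre ++ cs).length)
    (hnoD : ∀ i, i + 10 ≤ p → ¬ pvDocM <+: cs.drop i) :
    (if PySem.Chars.rfindFrom (pre ++ cs) pvDocM 0 (some ((pre.length + p : Nat) : Int)) = -1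
     then (0 : Int)
     else PySem.Chars.rfindFrom (pre ++ cs) pvDocM 0 (some ((pre.length + p : Nat) : Int)) + 10)
      = (pre.length : Int) := by
  rw [pvRfindFrom_take (by simpa using hplen)]
  have hD10 : pvDocM.length = 10 := by decide
  have hDne : pvDocM ≠ [] := by decide
  rcases hpre with rfl | ⟨q, rfl⟩
  · simp only [List.nil_append, List.length_nil, Nat.zero_add]
    have hr : PySem.Chars.rfind (cs.take p) pvDocM = -1 := by
      apply pvRfind_neg
      intro i hDp
      obtain ⟨h1, h2⟩ := (pvPrefix_drop_take hDne).1 hDp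
      exact hnoD i (by omega) h1
    rw [if_pos hr]
    simp
  · have hk10 : (q ++ pvDocM).length = q.length + 10 := by simp [hD10]
    have hocc : pvDocM <+: ((q ++ pvDocM) ++ cs).drop q.length := by
      rw [List.append_assoc, List.drop_left]
      exact List.prefix_append _ _
    have hr : PySem.Chars.rfind (((q ++ pvDocM) ++ cs).take ((q ++ pvDocM).length + p)) pvDocM
        = (q.length : Int) := by
      apply pvRfind_eq
      · rw [List.length_take]
        omega
      · exact (pvPrefix_drop_take hDne).2 ⟨hocc, by omega⟩
      · intro i hi hDp
        obtain ⟨h1, h2⟩ := (pvPrefix_drop_take hDne).1 hDp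
        by_cases hik : i < (q ++ pvDocM).length
        · exact pvSepDD hocc h1 hi (by omega)
        · rw [pvDrop_append_ge (by omega)] at h1
          exact hnoD (i - (q ++ pvDocM).length) (by omega) h1
    rw [if_neg (by rw [hr]; omega), hr]
    push_cast [hk10]
    ring

-- ===== main equivalence =====
theorem pvMainB (cs : List Char) : ∀ pre : List Char,
    (pre = [] ∨ ∃ q, pre = q ++ pvDocM) →
    pvAltGo (pre ++ cs) pre.length = pvLoopA (pre ++ cs) (pvSplitF cs) := by
  induction cs using pvSplitF.induct with
  | case1 cs hd =>
    intro pre hpre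
    have hw : (pre ++ cs).length = pre.length + cs.length := by simp
    by_cases hp : PySem.Chars.find cs pvTypeM = -1
    · have hpos : PySem.Chars.findFrom (pre ++ cs) pvTypeM ((pre.length : Nat) : Int) none = -1 := by
        rw [pvFindFrom_append, if_pos hp]
      rw [pvAltGo, hpos]
      rw [pvLoopA_none cs (by rwa [← PySem.Chars.find_eq_neg_one_iff])]
      simp
    · -- the 10-K marker occurs, and the dump is a single segment
      have h0 : 0 ≤ PySem.Chars.find cs pvTypeM := by
        have := PySem.Chars.neg_one_le_find cs pvTypeM; omega
      obtain ⟨hpT, hpmin⟩ := PySem.Chars.find_spec h0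
      set p := (PySem.Chars.find cs pvTypeM).toNat with hpdef
      have hT10 : pvTypeM.length = 10 := by decide
      have hplen : p + 10 ≤ cs.length := by
        have := hpT.length_le; rw [List.length_drop] at this; omega
      have hfT : PySem.Chars.find cs pvTypeM = (p : Int) := by omega
      have hposv : PySem.Chars.findFrom (pre ++ cs) pvTypeM ((pre.length : Nat) : Int) none
          = ((pre.length + p : Nat) : Int) := by
        rw [pvFindFrom_append, if_neg hp, hfT]; push_cast; ring
      have hne : ((pre.length + p : Nat) : Int) ≠ -1 := by omega
      rw [pvAltGo, hposv, dif_neg hne]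
      have hlo := pvLo_val (cs := cs) hpre (p := p) (by omega) (fun i _ hD => by
        rw [PySem.Chars.find_eq_neg_one_iff] at hd
        exact hd (pvInfix_of_prefix_drop hD))
      have hfD : PySem.Chars.find (cs.drop p) pvDocM = -1 := by
        rw [PySem.Chars.find_eq_neg_one_iff] at hd ⊢
        intro hinf
        obtain ⟨j, hj⟩ := (PySem.Chars.exists_prefix_drop_iff_isIn _ _).2
          ((PySem.Chars.isIn_iff_infix _ _).2 hinf)
        rw [List.drop_drop] at hj
        exact hd (pvInfix_of_prefix_drop hj)
      have hhiv : PySem.Chars.findFrom (pre ++ cs) pvDocM ((pre.length + p : Nat) : Int) none = -1 := by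
        rw [PySem.Chars.findFrom_natCast _ _ _ (by omega), pvDrop_append_ge (by omega)]
        have he : pre.length + p - pre.length = p := by omega
        rw [he, hfD]
        simp
      simp only [hlo, hhiv, reduceIte]
      have hseg : PySem.Chars.slice (pre ++ cs) (some ((pre.length : Nat) : Int))
          (some (((pre ++ cs).length : Nat) : Int)) = cs := by
        rw [PySem.Chars.slice_eq_listSlice, PySem.List.slice_natCast, List.drop_left]
        rw [List.take_of_length_le (by omega)]
      rw [hseg]
      have hisin : PySem.Chars.isIn pvTypeM cs = true :=
        (PySem.Chars.exists_prefix_drop_iff_isIn _ _).1 ⟨p, hpT⟩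
      rw [pvSplitF_of_neg cs hd, pvLoopA, pvType_or, hisin]
      simp only [if_true]
      split_ifs with hcond
      · rfl
      · -- no <TEXT> payload in the only candidate segment: both fall back to the whole dump
        have hpos2 : PySem.Chars.findFrom (pre ++ cs) pvTypeM (((pre ++ cs).length : Nat) : Int) none = -1 := by
          rw [PySem.Chars.findFrom_natCast _ _ _ (le_refl _), List.drop_length]
          have : PySem.Chars.find ([] : List Char) pvTypeM = -1 := by decide
          rw [this]
          simp
        rw [pvAltGo, hpos2, pvLoopA]
        simp
  | case2 cs hd ih =>
    intro pre hpre
    have hw : (pre ++ cs).length = pre.length + cs.length := by simp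
    have hD10 : pvDocM.length = 10 := by decide
    have hT10 : pvTypeM.length = 10 := by decide
    have hTne : pvTypeM ≠ [] := by decide
    have h0d : 0 ≤ PySem.Chars.find cs pvDocM := by
      have := PySem.Chars.neg_one_le_find cs pvDocM; omega
    obtain ⟨hDs, hdmin⟩ := PySem.Chars.find_spec h0d
    set d := (PySem.Chars.find cs pvDocM).toNat with hddef
    have hdlen : d + 10 ≤ cs.length := pvFind_doc_bound hd
    have htake : cs.take (d + 10) = cs.take d ++ pvDocM := by
      rw [List.take_add]
      congr 1
      have hpfx := List.prefix_iff_eq_take.1 hDs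
      rw [hD10] at hpfx
      exact hpfx.symm
    have hinv : (pre ++ cs.take (d + 10)) = [] ∨ ∃ q, (pre ++ cs.take (d + 10)) = q ++ pvDocM :=
      Or.inr ⟨pre ++ cs.take d, by rw [htake, ← List.append_assoc]⟩
    have hlen' : (pre ++ cs.take (d + 10)).length = pre.length + (d + 10) := by
      simp only [List.length_append, List.length_take]
      omega
    have hIH := ih (pre ++ cs.take (d + 10)) hinv
    have hXw : (pre ++ cs.take (d + 10)) ++ cs.drop (d + 10) = pre ++ cs := by
      rw [List.append_assoc, List.take_append_drop]
    rw [hXw, hlen'] at hIH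
    by_cases hp : PySem.Chars.find cs pvTypeM = -1
    · have hpos : PySem.Chars.findFrom (pre ++ cs) pvTypeM ((pre.length : Nat) : Int) none = -1 := by
        rw [pvFindFrom_append, if_pos hp]
      rw [pvAltGo, hpos]
      rw [pvLoopA_none cs (by rwa [← PySem.Chars.find_eq_neg_one_iff])]
      simp
    · have h0 : 0 ≤ PySem.Chars.find cs pvTypeM := by
        have := PySem.Chars.neg_one_le_find cs pvTypeM; omega
      obtain ⟨hpT, hpmin⟩ := PySem.Chars.find_spec h0
      set p := (PySem.Chars.find cs pvTypeM).toNat with hpdef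
      have hplen : p + 10 ≤ cs.length := by
        have := hpT.length_le; rw [List.length_drop] at this; omega
      have hfT : PySem.Chars.find cs pvTypeM = (p : Int) := by omega
      by_cases hpd : p < d
      · -- the 10-K marker lies in the first segment
        have hp10d : p + 10 ≤ d := by
          by_contra hc
          exact pvSepTD hpT hDs (by omega) (by omega)
        have hposv : PySem.Chars.findFrom (pre ++ cs) pvTypeM ((pre.length : Nat) : Int) none
            = ((pre.length + p : Nat) : Int) := by
          rw [pvFindFrom_append, if_neg hp, hfT]; push_cast; ring
        have hne : ((pre.length + p : Nat) : Int) ≠ -1 := by omega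
        rw [pvAltGo, hposv, dif_neg hne]
        have hlo := pvLo_val (cs := cs) hpre (p := p) (by omega)
          (fun i hi hD => hdmin i (by omega) hD)
        have hfD2 : PySem.Chars.find (cs.drop p) pvDocM = ((d - p : Nat) : Int) := by
          apply pvFind_eq
          · rw [List.drop_drop]
            have he : p + (d - p) = d := by omega
            rw [he]; exact hDs
          · intro j hj
            rw [List.drop_drop]
            exact hdmin (p + j) (by omega)
        have hhiv : PySem.Chars.findFrom (pre ++ cs) pvDocM ((pre.length + p : Nat) : Int) none
            = ((pre.length + d : Nat) : Int) := by
          rw [PySem.Chars.findFrom_natCast _ _ _ (by omega), pvDrop_append_ge (by omega)]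
          have he : pre.length + p - pre.length = p := by omega
          rw [he, hfD2, if_neg (by omega)]
          push_cast
          omega
        have hne2 : ((pre.length + d : Nat) : Int) ≠ -1 := by omega
        simp only [hlo, hhiv, hne2, Int.toNat_natCast, if_false]
        have hseg : PySem.Chars.slice (pre ++ cs) (some ((pre.length : Nat) : Int))
            (some ((pre.length + d : Nat) : Int)) = cs.take d := by
          rw [PySem.Chars.slice_eq_listSlice, PySem.List.slice_natCast, List.drop_left]
          congr 1
          omega
        rw [hseg]
        have hisin : PySem.Chars.isIn pvTypeM (cs.take d) = true :=
          (PySem.Chars.exists_prefix_drop_iff_isIn _ _).1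
            ⟨p, (pvPrefix_drop_take hTne).2 ⟨hpT, by omega⟩⟩
        rw [pvSplitF_of_found cs hd, ← hddef, pvLoopA, pvType_or, hisin]
        simp only [if_true]
        split_ifs with hcond
        · rfl
        · have hshift : PySem.Chars.findFrom (pre ++ cs) pvTypeM ((pre.length + d : Nat) : Int) none
              = PySem.Chars.findFrom (pre ++ cs) pvTypeM ((pre.length + (d + 10) : Nat) : Int) none := by
            apply pvFindFrom_shift (by omega) (by omega)
            intro i h1 h2 hT
            rw [pvDrop_append_ge (by omega)] at hT
            exact pvSepDT hDs hT (by omega) (by omega)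
          rw [pvAltGo_congr hshift]
          exact hIH
      · -- the first segment precedes the first 10-K marker: both skip it
        have hd10p : d + 10 ≤ p := by
          by_contra hc
          exact pvSepDT hDs hpT (by omega) (by omega)
        have hisin' : PySem.Chars.isIn pvTypeM (cs.take d) = false := by
          rw [PySem.Chars.isIn_eq_false_iff]
          intro hinf
          obtain ⟨j, hj⟩ := (PySem.Chars.exists_prefix_drop_iff_isIn _ _).2
            ((PySem.Chars.isIn_iff_infix _ _).2 hinf)
          obtain ⟨h1, h2⟩ := (pvPrefix_drop_take hTne).1 hj
          exact hpmin j (by omega) h1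
        rw [pvSplitF_of_found cs hd, ← hddef, pvLoopA, pvType_or, hisin']
        simp only [Bool.false_eq_true, if_false]
        have hshift2 : PySem.Chars.findFrom (pre ++ cs) pvTypeM ((pre.length : Nat) : Int) none
            = PySem.Chars.findFrom (pre ++ cs) pvTypeM ((pre.length + (d + 10) : Nat) : Int) none := by
          apply pvFindFrom_shift (by omega) (by omega)
          intro i h1 h2 hT
          rw [pvDrop_append_ge h1] at hT
          exact hpmin (i - pre.length) (by omega) hT
        rw [pvAltGo_congr hshift2]
        exact hIH


-- ===== VERDICT (by name: the statement is the Claim_ definition above) =====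
theorem extract_10k_html_py_spec : Claim_equal_extract_10k_html_py := by
  intro s _
  unfold Spec_extract_10k_html_py extract_10k_html_py extract_10k_html_py_alt
  rw [pvSplitOn_eq]
  have h := pvMainB s.toList [] (Or.inl rfl)
  simp only [List.nil_append, List.length_nil] at h
  rw [h]
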